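-- pv_equiv track=rewrite | github.com/Qi-Sun/SuzhouProjects | CityMotif/Pycode/src/mobility.py | get_places_dicts_in_all_routes
-- ===== SOURCE A (Python) =====
-- def get_places_dicts_in_all_routes(simple_routs):
--     places = {}
--     index_place = {}
--     num = 1
--     for arr in simple_routs:
--         for place in arr:
--             if place not in places:
--                 places[place] = num
--                 index_place[num] = place
--                 num += 1
--     return places
-- ===== SOURCE B (Python) =====
-- def get_places_dicts_in_all_routes(simple_routs):
--     flat = [p for arr in simple_routs for p in arr]
--     order = sorted(set(flat), key=flat.index)
--     return {p: i for i, p in enumerate(order, 1)}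
-- ===== Notes on version B (the rewrite author's own statement) =====
-- stated objective: alternative
-- what changed: Replaces A's fused single pass (membership test, running counter, unused index_place bookkeeping) by an index-and-sort algorithm: flatten the routes, take the set of places, sort them by their first-occurrence index in the flat stream (list.index), and number the sorted list with enumerate; correctness rests on first-occurrence indices being strictly increasing along first-appearance order.
import Mathlib
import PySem

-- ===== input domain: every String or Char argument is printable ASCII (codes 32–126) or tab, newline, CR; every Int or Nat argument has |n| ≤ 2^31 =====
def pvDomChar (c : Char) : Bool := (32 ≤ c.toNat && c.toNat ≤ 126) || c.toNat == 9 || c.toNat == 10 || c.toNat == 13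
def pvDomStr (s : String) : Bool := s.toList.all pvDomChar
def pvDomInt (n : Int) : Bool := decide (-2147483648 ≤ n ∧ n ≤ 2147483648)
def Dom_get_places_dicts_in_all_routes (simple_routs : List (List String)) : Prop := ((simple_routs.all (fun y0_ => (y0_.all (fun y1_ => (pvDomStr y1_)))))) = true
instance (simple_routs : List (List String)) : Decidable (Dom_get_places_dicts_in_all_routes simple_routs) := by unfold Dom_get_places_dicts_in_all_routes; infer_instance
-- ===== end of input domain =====

-- B replaces A's fused counter-and-membership pass by an index-and-sort algorithm:
-- sort the set of places by first-occurrence index in the flattened stream, then number them.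

-- ===== PORT A =====
-- state = (places, index_place, num), exactly A's three variables
def get_places_dicts_in_all_routes (simple_routs : List (List String)) : List (String × Int) :=
  (simple_routs.foldl
    (fun (st : PySem.Dict String Int × PySem.Dict Int String × Int) arr =>
      arr.foldl
        (fun st place =>
          if st.1.contains place then st
          else (st.1.insert place st.2.2, st.2.1.insert st.2.2 place, st.2.2 + 1))
        st)
    (PySem.Dict.empty, PySem.Dict.empty, 1)).1.items

-- ===== PORT B =====
-- flat = flattened places; order = sorted(set(flat), key=flat.index); {p: i for i, p in enumerate(order, 1)}
-- flat.index(p) is PySem.List.index? with getD 0; exact here since every p of set(flat) occurs in flat.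
def get_places_dicts_in_all_routes_alt (simple_routs : List (List String)) : List (String × Int) :=
  let flat := simple_routs.flatMap (fun arr => arr)
  let order := PySem.List.sorted (PySem.Set.ofList flat)
      (fun p => (PySem.List.index? flat p).getD 0) false
  ((PySem.List.enumerate order 1).foldl
    (fun (d : PySem.Dict String Int) p => d.insert p.2 p.1) PySem.Dict.empty).items

-- ===== PRECONDITION & SPEC =====
def Spec_get_places_dicts_in_all_routes (simple_routs : List (List String)) (out : List (String × Int)) : Prop := out = get_places_dicts_in_all_routes_alt simple_routs
instance (simple_routs : List (List String)) (out : List (String × Int)) : Decidable (Spec_get_places_dicts_in_all_routes simple_routs out) := by unfold Spec_get_places_dicts_in_all_routes; infer_instance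

-- ===== CLAIM (what is proved, stated in full; the proofs are below) =====
def Claim_equal_get_places_dicts_in_all_routes : Prop := ∀ (simple_routs : List (List String)), Dom_get_places_dicts_in_all_routes simple_routs → Spec_get_places_dicts_in_all_routes simple_routs (get_places_dicts_in_all_routes simple_routs)

-- ===== LEMMAS AND PROOFS =====

-- pvNumbered ks s = [(ks[0], s), (ks[1], s+1), …]: the common normal form of both results
def pvNumbered : List String → Int → List (String × Int)
  | [], _ => []
  | k :: ks, s => (k, s) :: pvNumbered ks (s + 1)

theorem pvNumbered_append (ks : List String) (p : String) (s : Int) :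
    pvNumbered (ks ++ [p]) s = pvNumbered ks s ++ [(p, s + ks.length)] := by
  induction ks generalizing s with
  | nil => simp [pvNumbered]
  | cons k ks ih => simp [pvNumbered, ih]; omega

theorem pvNumbered_map_fst (ks : List String) (s : Int) :
    (pvNumbered ks s).map (·.1) = ks := by
  induction ks generalizing s with
  | nil => rfl
  | cons k ks ih => simp [pvNumbered, ih]

theorem pvNumbered_eq_enumerate_swap (ks : List String) (s : Int) :
    (PySem.List.enumerate ks s).map (fun p => (p.2, p.1)) = pvNumbered ks s := by
  induction ks generalizing s with
  | nil => rfl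
  | cons k ks ih => simp [PySem.List.enumerate_cons, pvNumbered, ih]

-- A's inner loop, as a step function over the flattened place stream
def pvStepA (st : PySem.Dict String Int × PySem.Dict Int String × Int) (place : String) :
    PySem.Dict String Int × PySem.Dict Int String × Int :=
  if st.1.contains place then st
  else (st.1.insert place st.2.2, st.2.1.insert st.2.2 place, st.2.2 + 1)

-- A's loop invariant: places = numbered dedup-so-far, num = its length + 1
theorem pvLoopA (l : List String) : ∀ (ks : List String) (ip : PySem.Dict Int String),
    ks.Nodup →
    ∃ ip',
      l.foldl pvStepA (PySem.Dict.mk (pvNumbered ks 1), ip, (ks.length : Int) + 1)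
        = (PySem.Dict.mk (pvNumbered (PySem.Set.update ks l) 1), ip',
           ((PySem.Set.update ks l).length : Int) + 1) := by
  induction l with
  | nil => intro ks ip _; exact ⟨ip, rfl⟩
  | cons p l ih =>
    intro ks ip hnd
    rw [List.foldl_cons, PySem.Set.update_cons]
    by_cases hp : p ∈ ks
    · have hstep : pvStepA (PySem.Dict.mk (pvNumbered ks 1), ip, (ks.length : Int) + 1) p
          = (PySem.Dict.mk (pvNumbered ks 1), ip, (ks.length : Int) + 1) := by
        simp [pvStepA, PySem.Dict.contains_eq_decide_mem_keys, pvNumbered_map_fst, hp]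
      rw [hstep, PySem.Set.add_of_mem hp]
      exact ih ks ip hnd
    · have hcf : (PySem.Dict.mk (pvNumbered ks 1)).contains p = false := by
        simp [PySem.Dict.contains_eq_decide_mem_keys, pvNumbered_map_fst, hp]
      have hins : (PySem.Dict.mk (pvNumbered ks 1)).insert p ((ks.length : Int) + 1)
          = PySem.Dict.mk (pvNumbered (ks ++ [p]) 1) := by
        apply PySem.Dict.ext
        rw [PySem.Dict.items_insert_of_not_contains _ _ hcf, pvNumbered_append]
        simp [add_comm]
      have hstep : pvStepA (PySem.Dict.mk (pvNumbered ks 1), ip, (ks.length : Int) + 1) p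
          = (PySem.Dict.mk (pvNumbered (ks ++ [p]) 1), ip.insert ((ks.length : Int) + 1) p,
             ((ks ++ [p]).length : Int) + 1) := by
        simp only [pvStepA, hcf]
        simp only [Bool.false_eq_true, if_false, hins]
        congr 2
        simp [List.length_append]
      rw [hstep, PySem.Set.add_of_not_mem hp]
      exact ih (ks ++ [p]) _ (by simp [List.nodup_append, hnd]; exact fun a ha he => hp (he ▸ ha))

-- first-occurrence index of a member is in range
theorem pvIndex_lt_length {l : List String} {a : String} (ha : a ∈ l) :
    (PySem.List.index? l a).getD 0 < l.length := by
  obtain ⟨k, hk⟩ := Option.isSome_iff_exists.mp ((PySem.List.index?_isSome_iff l a).mpr ha)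
  obtain ⟨hlt, -, -⟩ := PySem.List.getElem_of_index?_eq_some hk
  rw [hk]
  simpa using hlt

-- dedup of a snoc
theorem pvDedup_snoc (l : List String) (x : String) :
    PySem.List.dedup (l ++ [x])
      = if x ∈ l then PySem.List.dedup l else PySem.List.dedup l ++ [x] := by
  simp only [PySem.List.dedup_eq_ofList, PySem.Set.ofList_eq_foldl, List.foldl_append,
    List.foldl_cons, List.foldl_nil]
  by_cases hx : x ∈ l
  · rw [PySem.Set.add_of_mem (by rw [← PySem.Set.ofList_eq_foldl, PySem.Set.mem_ofList]; exact hx)]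
    simp [hx]
  · rw [PySem.Set.add_of_not_mem (by rw [← PySem.Set.ofList_eq_foldl, PySem.Set.mem_ofList]; exact hx)]
    simp [hx]

-- first-occurrence indices are strictly increasing along first-appearance order
theorem pvDedup_key_pairwise (l : List String) :
    (PySem.List.dedup l).Pairwise
      (fun a b => (PySem.List.index? l a).getD 0 < (PySem.List.index? l b).getD 0) := by
  induction l using List.reverseRecOn with
  | nil => simp [PySem.List.dedup]
  | append_singleton l x ih =>
    rw [pvDedup_snoc]
    by_cases hx : x ∈ l
    · simp only [hx, if_true]
      refine ih.imp_of_mem ?_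
      intro a b ha hb hab
      have ha' := (PySem.List.mem_dedup _ _).mp ha
      have hb' := (PySem.List.mem_dedup _ _).mp hb
      rwa [PySem.List.index?_append_of_mem _ ha', PySem.List.index?_append_of_mem _ hb']
    · simp only [hx, if_false]
      rw [List.pairwise_append]
      refine ⟨ih.imp_of_mem ?_, by simp, ?_⟩
      · intro a b ha hb hab
        have ha' := (PySem.List.mem_dedup _ _).mp ha
        have hb' := (PySem.List.mem_dedup _ _).mp hb
        rwa [PySem.List.index?_append_of_mem _ ha', PySem.List.index?_append_of_mem _ hb']
      · intro a ha b hb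
        rw [List.mem_singleton] at hb
        subst hb
        have ha' := (PySem.List.mem_dedup _ _).mp ha
        rw [PySem.List.index?_append_of_mem _ ha',
          PySem.List.index?_append_singleton_self _ _ hx]
        simpa using pvIndex_lt_length ha'

-- B's sort by first-occurrence index returns exactly dedup flat
theorem pvOrder_eq_dedup (flat : List String) :
    PySem.List.sorted (PySem.Set.ofList flat)
        (fun p => (PySem.List.index? flat p).getD 0) false
      = PySem.List.dedup flat := by
  refine PySem.List.sorted_eq_of_perm_of_pairwise_lt _ _ _ ?_ (pvDedup_key_pairwise flat)
  rw [PySem.List.dedup_eq_ofList]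

-- B's fold of inserts over fresh distinct keys yields the numbered dedup list
theorem pvB_items (simple_routs : List (List String)) :
    get_places_dicts_in_all_routes_alt simple_routs
      = pvNumbered (PySem.List.dedup (simple_routs.flatMap (fun arr => arr))) 1 := by
  set flat := simple_routs.flatMap (fun arr => arr) with hflat
  show ((PySem.List.enumerate (PySem.List.sorted (PySem.Set.ofList flat)
      (fun p => (PySem.List.index? flat p).getD 0) false) 1).foldl
    (fun (d : PySem.Dict String Int) p => d.insert p.2 p.1) PySem.Dict.empty).items = _
  rw [pvOrder_eq_dedup]
  have hnd : (PySem.List.dedup flat).Nodup := PySem.List.nodup_dedup flat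
  rw [PySem.Dict.items_foldl_insert_fresh
      (k := fun p => p.2) (v := fun p => p.1)
      (l := PySem.List.enumerate (PySem.List.dedup flat) 1)
      (d := PySem.Dict.empty)
      (by intro a _; simp [PySem.Dict.contains_empty])
      (by rw [show (fun p : Int × String => p.2) = (·.2) from rfl,
              PySem.List.map_snd_enumerate]; exact hnd)]
  simp [PySem.Dict.empty, pvNumbered_eq_enumerate_swap]

-- A's nested fold is the fold of pvStepA over the flattened place stream
theorem pvA_eq (rs : List (List String)) :
    get_places_dicts_in_all_routes rs
      = ((rs.flatMap (fun arr => arr)).foldl pvStepA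
          (PySem.Dict.empty, PySem.Dict.empty, 1)).1.items := by
  unfold get_places_dicts_in_all_routes
  rw [List.flatMap_def, List.foldl_flatten, List.map_id']
  rfl

-- ===== VERDICT (by name: the statement is the Claim_ definition above) =====
theorem get_places_dicts_in_all_routes_spec : Claim_equal_get_places_dicts_in_all_routes := by
  intro simple_routs _
  show get_places_dicts_in_all_routes simple_routs = get_places_dicts_in_all_routes_alt simple_routs
  rw [pvB_items, pvA_eq]
  obtain ⟨ip', h⟩ := pvLoopA (simple_routs.flatMap (fun arr => arr)) [] PySem.Dict.empty List.nodup_nil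
  rw [show ((PySem.Dict.empty, PySem.Dict.empty, 1) :
        PySem.Dict String Int × PySem.Dict Int String × Int)
      = (PySem.Dict.mk (pvNumbered [] 1), PySem.Dict.empty, (([] : List String).length : Int) + 1)
      from rfl, h]
  rw [PySem.Set.update_nil_left, PySem.List.dedup_eq_ofList]
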